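-- pv_equiv track=rewrite | github.com/bilal-ozlu/Ceng111 | THE3/the3.py | zoitank
-- ===== SOURCE A (Python) =====
-- def zoitank(ex,final,stack):
-- 	if ex == "":
-- 		if stack == "":
-- 			return help(final)
-- 		else:
-- 			final = final + stack[::-1]
-- 			return help(final)
-- 	elif ex[0] == " ":
-- 		return zoitank(ex[1:],final,stack)
-- 	elif ex[0] == "^":
-- 		stack = stack + ex[0]
-- 		return zoitank(ex[1:],final,stack)
-- 	elif ex[0] == "/" or ex[0] == "*":
-- 		if stack == "":
-- 			stack = stack + ex[0]
-- 			return zoitank(ex[1:],final,stack)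
-- 		elif stack[-1] == "+" or stack[-1] == "-" or stack[-1] == "(":
-- 			stack = stack + ex[0]
-- 			return zoitank(ex[1:],final,stack)
-- 		else:
-- 			final = final + stack[-1]
-- 			stack = stack[:-1]
-- 			return zoitank(ex,final,stack)
-- 	elif ex[0] == "+" or ex[0] == "-":
-- 		if stack == "":
-- 			stack = stack + ex[0]
-- 			return zoitank(ex[1:],final,stack)
-- 		elif stack[-1] == "(":
-- 			stack = stack + ex[0]
-- 			return zoitank(ex[1:],final,stack)
-- 		else:
-- 			final = final + stack[-1]
-- 			stack = stack[:-1]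
-- 			return zoitank(ex,final,stack)
-- 	elif ex[0] == "(":
-- 		stack = stack + ex[0]
-- 		return zoitank(ex[1:],final,stack)
-- 	elif ex[0] == ")":
-- 		final = final + stack[::-1][:stack[::-1].index("(")]
-- 		stack = stack[::-1][stack[::-1].index("(")+1::][::-1]
-- 		return zoitank(ex[1:],final,stack)
-- 	else:
-- 			final = final + ex[0]
-- 			return zoitank(ex[1:],final,stack)
--
-- def help(final):
-- 	return helphelp(final,[],"")
--
-- def helphelp(final,depo,netice):
-- 	if final == "":
-- 		return fevkalade(depo[0][1:-1])
-- 	elif final[0]=="a" or final[0]=="b" or final[0]=="c" or final[0]=="d" or final[0]=="e" or final[0]=="f" or final[0]=="g" or final[0]=="h" or final[0]=="i" or final[0]=="j" or final[0]=="k" or final[0]=="l" or final[0]=="m" or final[0]=="n" or final[0]=="o" or final[0]=="p" or final[0]=="q" or final[0]=="r" or final[0]=="s" or final[0]=="t" or final[0]=="u" or final[0]=="v" or final[0]=="w" or final[0]=="x" or final[0]=="y" or final[0]=="z":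
-- 		depo.append(final[0])
-- 		return helphelp(final[1:],depo,netice)
-- 	else:
-- 		deponundadeposu = ("(" + depo[-2] + final[0] + depo[-1] + ")")
-- 		depo = depo[:-2]
-- 		depo.append(deponundadeposu)
-- 		return helphelp(final[1:],depo,netice)
--
-- def fevkalade(depo):
-- 	depo=depo.replace("/","<<<")
-- 	depo=depo.replace("*","|||")
-- 	depo=depo.replace("<<<","*")
-- 	coksukur=depo.replace("|||","/")
-- 	return coksukur
-- ===== SOURCE B (Python) =====
-- def zoitank(ex, final, stack):
--     # single-pass iterative shunting-yard with list stacks, then one postfix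
--     # fold that builds the parenthesized tree with * and / swapped in place
--     out = list(final)
--     st = list(stack)
--     for ch in ex:
--         if ch == ' ':
--             continue
--         elif ch == '^' or ch == '(':
--             st.append(ch)
--         elif ch == '*' or ch == '/':
--             while st and st[-1] != '+' and st[-1] != '-' and st[-1] != '(':
--                 out.append(st.pop())
--             st.append(ch)
--         elif ch == '+' or ch == '-':
--             while st and st[-1] != '(':
--                 out.append(st.pop())
--             st.append(ch)
--         elif ch == ')':
--             while st[-1] != '(':      # IndexError on unmatched ')'
--                 out.append(st.pop())
--             st.pop()
--         else:
--             out.append(ch)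
--     while st:
--         out.append(st.pop())
--     depo = []
--     for ch in out:
--         if 'a' <= ch <= 'z':
--             depo.append(ch)
--         else:
--             right = depo.pop()
--             left = depo.pop()
--             op = '/' if ch == '*' else ('*' if ch == '/' else ch)
--             depo.append('(' + left + op + right + ')')
--     return depo[0][1:-1]
-- ===== Notes on version B (the rewrite author's own statement) =====
-- stated objective: faster
-- what changed: A converts infix to postfix by a restart-recursion that re-enters itself without consuming input and rebuilds strings with reversals, slices and .index, then post-patches the result with a 4-step replace chain; B is a single iterative shunting-yard pass with list stacks followed by one postfix fold that swaps * and / in place while building the tree, with no replace chain.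
-- outside the precondition, e.g. on zoitank('ab|', '', ''): A returns 'a|b', B returns 'a|b'; on zoitank('ab<', '', ''): A returns 'a<b', B returns 'a<b'; on zoitank('abc<|', '', ''): A returns 'a|(b<c)', B returns 'a|(b<c)'
import Mathlib
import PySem

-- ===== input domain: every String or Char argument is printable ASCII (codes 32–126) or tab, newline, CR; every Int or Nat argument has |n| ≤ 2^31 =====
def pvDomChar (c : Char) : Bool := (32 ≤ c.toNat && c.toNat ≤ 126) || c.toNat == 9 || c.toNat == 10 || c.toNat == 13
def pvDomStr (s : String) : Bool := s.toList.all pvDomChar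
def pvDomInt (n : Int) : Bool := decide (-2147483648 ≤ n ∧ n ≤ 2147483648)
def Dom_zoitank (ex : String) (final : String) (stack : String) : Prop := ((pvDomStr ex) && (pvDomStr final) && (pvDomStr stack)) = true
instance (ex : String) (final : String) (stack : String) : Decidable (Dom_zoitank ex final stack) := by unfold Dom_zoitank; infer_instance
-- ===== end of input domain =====

-- B rewrites A's O(n^2) restart-recursion as one iterative shunting-yard pass plus one
-- postfix fold that swaps * and / in place (no replace-chain); equivalence is proved on
-- well-formed infix expressions with the accumulators in their intended initial state.

-- ===== PORT A =====
-- Strings are ported as List Char (PySem.Chars); each Python string used as a stack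
-- (`stack`, `depo`) is stored TOP-FIRST: Python `s + c` is `c :: st`, `s[-1]` is the
-- head, `s[::-1]` is the stored list itself, `depo[0]` is `getLast?`.
def pvIsLowerA (c : Char) : Bool :=
  c == 'a' || c == 'b' || c == 'c' || c == 'd' || c == 'e' || c == 'f' || c == 'g' ||
  c == 'h' || c == 'i' || c == 'j' || c == 'k' || c == 'l' || c == 'm' || c == 'n' ||
  c == 'o' || c == 'p' || c == 'q' || c == 'r' || c == 's' || c == 't' || c == 'u' ||
  c == 'v' || c == 'w' || c == 'x' || c == 'y' || c == 'z'

def pvFevkalade (s : List Char) : List Char :=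
  let s1 := PySem.Chars.replace s ['/'] ['<', '<', '<']
  let s2 := PySem.Chars.replace s1 ['*'] ['|', '|', '|']
  let s3 := PySem.Chars.replace s2 ['<', '<', '<'] ['*']
  PySem.Chars.replace s3 ['|', '|', '|'] ['/']

-- Python's final `fevkalade(depo[0][1:-1])` (depo[0] is the bottom = getLast? here;
-- IndexError on an empty depo, outside Pre_)
def pvFinishA (depo : List (List Char)) : List Char :=
  match depo.getLast? with
  | some d => pvFevkalade (PySem.Chars.slice d (some 1) (some (-1)))
  | none => []

def pvHelphelp : List Char → List (List Char) → List Char → List Char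
  | [], depo, _ => pvFinishA depo
  | c :: cs, depo, netice =>
    if pvIsLowerA c then pvHelphelp cs ([c] :: depo) netice
    else
      match depo with                  -- depo[-1] is the head, depo[-2] the second
      | a :: b :: dr => pvHelphelp cs ((('(' :: b) ++ c :: a ++ [')']) :: dr) netice
      | _ => []                        -- Python IndexError on depo[-2] (outside Pre_)

def pvHelp (finalL : List Char) : List Char := pvHelphelp finalL [] []

def pvZoitank : List Char → List Char → List Char → List Char
  | [], out, st => if st = [] then pvHelp out else pvHelp (out ++ st)
  | c :: ex, out, st =>
    if c = ' ' then pvZoitank ex out st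
    else if c = '^' then pvZoitank ex out (c :: st)
    else if c = '/' ∨ c = '*' then
      match st with
      | [] => pvZoitank ex out [c]
      | t :: st' =>
        if t = '+' ∨ t = '-' ∨ t = '(' then pvZoitank ex out (c :: t :: st')
        else pvZoitank (c :: ex) (out ++ [t]) st'
    else if c = '+' ∨ c = '-' then
      match st with
      | [] => pvZoitank ex out [c]
      | t :: st' =>
        if t = '(' then pvZoitank ex out (c :: t :: st')
        else pvZoitank (c :: ex) (out ++ [t]) st'
    else if c = '(' then pvZoitank ex out (c :: st)
    else if c = ')' then
      match PySem.List.index? st '(' with   -- Python stack[::-1].index("(")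
      | some i => pvZoitank ex (out ++ st.take i) (st.drop (i + 1))
      | none => []                     -- Python ValueError (outside Pre_)
    else pvZoitank ex (out ++ [c]) st
termination_by ex out st => (ex.length, st.length)
decreasing_by all_goals simp_wf <;> omega

def zoitank (ex : String) (final : String) (stack : String) : String :=
  String.mk (pvZoitank ex.toList final.toList stack.toList.reverse)

-- ===== PORT B =====
def pvSwap (c : Char) : Char := if c == '*' then '/' else if c == '/' then '*' else c

def pvPopStar : List Char → List Char → List Char × List Char
  | out, [] => (out, [])
  | out, t :: st =>
    if t != '+' && t != '-' && t != '(' then pvPopStar (out ++ [t]) st else (out, t :: st)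

def pvPopPlus : List Char → List Char → List Char × List Char
  | out, [] => (out, [])
  | out, t :: st =>
    if t != '(' then pvPopPlus (out ++ [t]) st else (out, t :: st)

def pvPopParen : List Char → List Char → Option (List Char × List Char)
  | _, [] => none                      -- Python IndexError (outside Pre_)
  | out, t :: st =>
    if t != '(' then pvPopParen (out ++ [t]) st else some (out, st)

def pvShunt : List Char → List Char → List Char → Option (List Char)
  | [], out, st => some (out ++ st)
  | c :: ex, out, st =>
    if c == ' ' then pvShunt ex out st
    else if c == '^' || c == '(' then pvShunt ex out (c :: st)
    else if c == '*' || c == '/' then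
      let p := pvPopStar out st
      pvShunt ex p.1 (c :: p.2)
    else if c == '+' || c == '-' then
      let p := pvPopPlus out st
      pvShunt ex p.1 (c :: p.2)
    else if c == ')' then
      match pvPopParen out st with
      | some p => pvShunt ex p.1 p.2
      | none => none
    else pvShunt ex (out ++ [c]) st

-- `depo[0][1:-1]` (IndexError on an empty depo, outside Pre_)
def pvFinishB (depo : List (List Char)) : List Char :=
  match depo.getLast? with
  | some d => PySem.Chars.slice d (some 1) (some (-1))
  | none => []

def pvBuild : List Char → List (List Char) → List Char
  | [], depo => pvFinishB depo
  | c :: cs, depo =>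
    if 'a' ≤ c && c ≤ 'z' then pvBuild cs ([c] :: depo)
    else
      match depo with
      | r :: l :: dr => pvBuild cs ((('(' :: l) ++ pvSwap c :: r ++ [')']) :: dr)
      | _ => []

def zoitank_alt (ex : String) (final : String) (stack : String) : String :=
  match pvShunt ex.toList final.toList stack.toList.reverse with
  | some p => String.mk (pvBuild p [])
  | none => ""

-- ===== PRECONDITION & SPEC =====
-- Pre_ is A's domain up to one stated exclusion. One counting pass over the input
-- checks that every ')' finds a matching '(' (else A raises ValueError at .index)
-- and that each non-lowercase character of the emitted postfix sees at least two
-- built subtrees and at least one remains at the end (else A raises IndexError in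
-- helphelp). Additionally Pre_ excludes inputs containing '<' or '|': A still
-- returns on those (B agrees on the cited samples), but A's replace-chain swap is
-- proved equal to B's character swap only in their absence.
def pvEmit (t : Char) (cnt : Nat) : Option Nat :=
  if 'a' ≤ t ∧ t ≤ 'z' then some (cnt + 1)
  else if 2 ≤ cnt then some (cnt - 1) else none

def pvScanCnt : List Char → Nat → Option Nat
  | [], cnt => some cnt
  | t :: cs, cnt =>
    match pvEmit t cnt with
    | some c2 => pvScanCnt cs c2
    | none => none

def pvDrainCnt (stop : Char → Bool) : List Char → Nat → Option (List Char × Nat)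
  | [], cnt => some ([], cnt)
  | t :: st, cnt =>
    if stop t then some (t :: st, cnt)
    else
      match pvEmit t cnt with
      | some c2 => pvDrainCnt stop st c2
      | none => none

def pvDrainParenCnt : List Char → Nat → Option (List Char × Nat)
  | [], _ => none
  | t :: st, cnt =>
    if t = '(' then some (st, cnt)
    else
      match pvEmit t cnt with
      | some c2 => pvDrainParenCnt st c2
      | none => none

def pvOk : List Char → List Char → Nat → Bool
  | [], st, cnt =>
    (match pvScanCnt st cnt with
     | some e => decide (1 ≤ e)
     | none => false)
  | c :: ex, st, cnt =>
    if c = ' ' then pvOk ex st cnt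
    else if c = '^' ∨ c = '(' then pvOk ex (c :: st) cnt
    else if c = '*' ∨ c = '/' then
      match pvDrainCnt (fun t => t = '+' ∨ t = '-' ∨ t = '(') st cnt with
      | some p => pvOk ex (c :: p.1) p.2
      | none => false
    else if c = '+' ∨ c = '-' then
      match pvDrainCnt (fun t => t = '(') st cnt with
      | some p => pvOk ex (c :: p.1) p.2
      | none => false
    else if c = ')' then
      match pvDrainParenCnt st cnt with
      | some p => pvOk ex p.1 p.2
      | none => false
    else
      match pvEmit c cnt with
      | some c2 => pvOk ex st c2
      | none => false

def pvCleanStr (s : String) : Bool := s.toList.all (fun c => c != '<' && c != '|')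

def Pre_zoitank (ex : String) (final : String) (stack : String) : Prop :=
  (pvCleanStr ex && pvCleanStr final && pvCleanStr stack &&
   (match pvScanCnt final.toList 0 with
    | some cnt => pvOk ex.toList stack.toList.reverse cnt
    | none => false)) = true

instance (ex : String) (final : String) (stack : String) : Decidable (Pre_zoitank ex final stack) := by
  unfold Pre_zoitank; infer_instance

def pvWitness_zoitank : String × String × String := ("a+b*(c-d) / e", "", "")

def Spec_zoitank (ex : String) (final : String) (stack : String) (out : String) : Prop := out = zoitank_alt ex final stack
instance (ex : String) (final : String) (stack : String) (out : String) : Decidable (Spec_zoitank ex final stack out) := by unfold Spec_zoitank; infer_instance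

-- ===== CLAIM (what is proved, stated in full; the proofs are below) =====
def Claim_equal_zoitank : Prop := ∀ (ex : String) (final : String) (stack : String), Dom_zoitank ex final stack → Pre_zoitank ex final stack → Spec_zoitank ex final stack (zoitank ex final stack)

-- ===== LEMMAS AND PROOFS =====

-- characters that the replace chain in pvFevkalade could mangle
def pvCleanC (c : Char) : Prop := c ≠ '<' ∧ c ≠ '|'
def pvClean (l : List Char) : Prop := ∀ c ∈ l, pvCleanC c

-- the flatMap shapes the replace chain goes through
def pvF1 (c : Char) : List Char := if c = '/' then ['<', '<', '<'] else if c = '*' then ['|', '|', '|'] else [c]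
def pvF2 (c : Char) : List Char := if c = '/' then ['*'] else if c = '*' then ['|', '|', '|'] else [c]

theorem pv_go_single (a : Char) (t : List Char) :
    ∀ (l : List Char) (fuel : Nat) (acc : List Char), l.length ≤ fuel →
      PySem.Chars.replace.go [a] t fuel l acc
        = acc.reverse ++ l.flatMap (fun c => if c = a then t else [c]) := by
  intro l
  induction l with
  | nil =>
    intro fuel acc _
    cases fuel <;> simp [PySem.Chars.replace.go]
  | cons c l ih =>
    intro fuel acc hf
    cases fuel with
    | zero => simp at hf
    | succ f =>
      by_cases hc : c = a
      · subst hc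
        rw [show PySem.Chars.replace.go [c] t (f + 1) (c :: l) acc
              = PySem.Chars.replace.go [c] t f l (t.reverse ++ acc) from by
            simp [PySem.Chars.replace.go, List.isPrefixOf]]
        rw [ih f (t.reverse ++ acc) (by simpa using hf)]
        simp
      · rw [show PySem.Chars.replace.go [a] t (f + 1) (c :: l) acc
              = PySem.Chars.replace.go [a] t f l (c :: acc) from by
            simp [PySem.Chars.replace.go, List.isPrefixOf, Ne.symm hc]]
        rw [ih f (c :: acc) (by simpa using hf)]
        simp [hc]

theorem pv_replace_single (a : Char) (t : List Char) (l : List Char) :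
    PySem.Chars.replace l [a] t = l.flatMap (fun c => if c = a then t else [c]) := by
  rw [show PySem.Chars.replace l [a] t = PySem.Chars.replace.go [a] t l.length l [] from by
        simp [PySem.Chars.replace]]
  rw [pv_go_single a t l l.length [] le_rfl]
  simp

theorem pv_go_lll :
    ∀ (s : List Char), pvClean s → ∀ (k : Nat) (fuel : Nat) (acc : List Char),
      (List.replicate k '|' ++ s.flatMap pvF1).length ≤ fuel →
      PySem.Chars.replace.go ['<', '<', '<'] ['*'] fuel (List.replicate k '|' ++ s.flatMap pvF1) acc
        = acc.reverse ++ List.replicate k '|' ++ s.flatMap pvF2 := by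
  intro s
  induction s with
  | nil =>
    intro _ k
    induction k with
    | zero =>
      intro fuel acc _
      cases fuel <;> simp [PySem.Chars.replace.go]
    | succ k ihk =>
      intro fuel acc h
      cases fuel with
      | zero => simp at h
      | succ f =>
        rw [List.replicate_succ]
        rw [show PySem.Chars.replace.go ['<', '<', '<'] ['*'] (f + 1)
              (('|' :: List.replicate k '|') ++ List.flatMap pvF1 [] ) acc
              = PySem.Chars.replace.go ['<', '<', '<'] ['*'] f
                  (List.replicate k '|' ++ List.flatMap pvF1 []) ('|' :: acc) from by
            simp [PySem.Chars.replace.go, List.isPrefixOf]]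
        rw [ihk f ('|' :: acc) (by simpa [List.replicate_succ] using h)]
        simp [List.replicate_succ]
  | cons c s ih =>
    intro hcl k
    have hc : pvCleanC c := hcl c (List.mem_cons_self)
    have hs : pvClean s := fun x hx => hcl x (List.mem_cons_of_mem _ hx)
    induction k with
    | succ k ihk =>
      intro fuel acc h
      cases fuel with
      | zero => simp at h
      | succ f =>
        rw [List.replicate_succ]
        rw [show PySem.Chars.replace.go ['<', '<', '<'] ['*'] (f + 1)
              (('|' :: List.replicate k '|') ++ List.flatMap pvF1 (c :: s)) acc
              = PySem.Chars.replace.go ['<', '<', '<'] ['*'] f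
                  (List.replicate k '|' ++ List.flatMap pvF1 (c :: s)) ('|' :: acc) from by
            simp [PySem.Chars.replace.go, List.isPrefixOf]]
        rw [ihk f ('|' :: acc) (by simpa [List.replicate_succ] using h)]
        simp [List.replicate_succ]
    | zero =>
      intro fuel acc h
      simp only [List.replicate, List.nil_append] at h ⊢
      by_cases h1 : c = '/'
      · subst h1
        cases fuel with
        | zero => simp [pvF1] at h
        | succ f =>
          rw [show List.flatMap pvF1 ('/' :: s) = '<' :: '<' :: '<' :: List.flatMap pvF1 s from by
                simp [pvF1]]
          rw [show PySem.Chars.replace.go ['<', '<', '<'] ['*'] (f + 1)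
                ('<' :: '<' :: '<' :: List.flatMap pvF1 s) acc
                = PySem.Chars.replace.go ['<', '<', '<'] ['*'] f (List.flatMap pvF1 s) ('*' :: acc) from by
              simp [PySem.Chars.replace.go, List.isPrefixOf]]
          have := ih hs 0 f ('*' :: acc) (by
            simp [pvF1, List.replicate] at h ⊢; omega)
          simp only [List.replicate, List.nil_append] at this
          rw [this]
          simp [pvF2]
      · by_cases h2 : c = '*'
        · subst h2
          cases fuel with
          | zero => simp [pvF1] at h
          | succ f =>
            rw [show List.flatMap pvF1 ('*' :: s) = '|' :: '|' :: '|' :: List.flatMap pvF1 s from by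
                  simp [pvF1]]
            rw [show PySem.Chars.replace.go ['<', '<', '<'] ['*'] (f + 1)
                  ('|' :: '|' :: '|' :: List.flatMap pvF1 s) acc
                  = PySem.Chars.replace.go ['<', '<', '<'] ['*'] f
                      ('|' :: '|' :: List.flatMap pvF1 s) ('|' :: acc) from by
                simp [PySem.Chars.replace.go, List.isPrefixOf]]
            have := ih hs 2 f ('|' :: acc) (by
              simp [pvF1, List.replicate] at h ⊢; omega)
            rw [show ('|' :: '|' :: List.flatMap pvF1 s)
                  = List.replicate 2 '|' ++ List.flatMap pvF1 s from by simp [List.replicate]] 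
            rw [this]
            simp [List.replicate, pvF2]
        · cases fuel with
          | zero => simp [pvF1, h1, h2] at h
          | succ f =>
            rw [show List.flatMap pvF1 (c :: s) = c :: List.flatMap pvF1 s from by
                  simp [pvF1, h1, h2]]
            rw [show PySem.Chars.replace.go ['<', '<', '<'] ['*'] (f + 1)
                  (c :: List.flatMap pvF1 s) acc
                  = PySem.Chars.replace.go ['<', '<', '<'] ['*'] f (List.flatMap pvF1 s) (c :: acc) from by
                simp [PySem.Chars.replace.go, List.isPrefixOf, Ne.symm hc.1]]
            have := ih hs 0 f (c :: acc) (by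
              simp [pvF1, h1, h2, List.replicate] at h ⊢; omega)
            simp only [List.replicate, List.nil_append] at this
            rw [this]
            simp [pvF2, h1, h2]

theorem pv_go_bbb :
    ∀ (s : List Char), pvClean s → ∀ (fuel : Nat) (acc : List Char),
      (s.flatMap pvF2).length ≤ fuel →
      PySem.Chars.replace.go ['|', '|', '|'] ['/'] fuel (s.flatMap pvF2) acc
        = acc.reverse ++ s.map pvSwap := by
  intro s
  induction s with
  | nil =>
    intro _ fuel acc _
    cases fuel <;> simp [PySem.Chars.replace.go]
  | cons c s ih =>
    intro hcl fuel acc h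
    have hc : pvCleanC c := hcl c (List.mem_cons_self)
    have hs : pvClean s := fun x hx => hcl x (List.mem_cons_of_mem _ hx)
    by_cases h1 : c = '/'
    · subst h1
      cases fuel with
      | zero => simp [pvF2] at h
      | succ f =>
        rw [show List.flatMap pvF2 ('/' :: s) = '*' :: List.flatMap pvF2 s from by simp [pvF2]]
        rw [show PySem.Chars.replace.go ['|', '|', '|'] ['/'] (f + 1)
              ('*' :: List.flatMap pvF2 s) acc
              = PySem.Chars.replace.go ['|', '|', '|'] ['/'] f (List.flatMap pvF2 s) ('*' :: acc) from by
            simp [PySem.Chars.replace.go, List.isPrefixOf]]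
        rw [ih hs f ('*' :: acc) (by simp [pvF2] at h ⊢; omega)]
        simp [pvSwap]
    · by_cases h2 : c = '*'
      · subst h2
        cases fuel with
        | zero => simp [pvF2] at h
        | succ f =>
          rw [show List.flatMap pvF2 ('*' :: s) = '|' :: '|' :: '|' :: List.flatMap pvF2 s from by
                simp [pvF2]]
          rw [show PySem.Chars.replace.go ['|', '|', '|'] ['/'] (f + 1)
                ('|' :: '|' :: '|' :: List.flatMap pvF2 s) acc
                = PySem.Chars.replace.go ['|', '|', '|'] ['/'] f (List.flatMap pvF2 s) ('/' :: acc) from by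
              simp [PySem.Chars.replace.go, List.isPrefixOf]]
          rw [ih hs f ('/' :: acc) (by simp [pvF2] at h ⊢; omega)]
          simp [pvSwap]
      · cases fuel with
        | zero => simp [pvF2, h1, h2] at h
        | succ f =>
          rw [show List.flatMap pvF2 (c :: s) = c :: List.flatMap pvF2 s from by
                simp [pvF2, h1, h2]]
          rw [show PySem.Chars.replace.go ['|', '|', '|'] ['/'] (f + 1)
                (c :: List.flatMap pvF2 s) acc
                = PySem.Chars.replace.go ['|', '|', '|'] ['/'] f (List.flatMap pvF2 s) (c :: acc) from by
              simp [PySem.Chars.replace.go, List.isPrefixOf, Ne.symm hc.2]]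
          rw [ih hs f (c :: acc) (by simp [pvF2, h1, h2] at h ⊢; omega)]
          simp [pvSwap, h1, h2]

theorem pv_fevkalade_clean (s : List Char) (hs : pvClean s) :
    pvFevkalade s = s.map pvSwap := by
  show PySem.Chars.replace (PySem.Chars.replace (PySem.Chars.replace
      (PySem.Chars.replace s ['/'] ['<', '<', '<']) ['*'] ['|', '|', '|'])
      ['<', '<', '<'] ['*']) ['|', '|', '|'] ['/'] = s.map pvSwap
  rw [pv_replace_single, pv_replace_single, List.flatMap_assoc]
  have hf1 : (fun x => List.flatMap (fun c => if c = '*' then ['|', '|', '|'] else [c])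
      (if x = '/' then ['<', '<', '<'] else [x])) = pvF1 := by
    funext x
    by_cases hx : x = '/'
    · simp [hx, pvF1]
    · by_cases hx2 : x = '*' <;> simp [hx, hx2, pvF1]
  rw [hf1]
  rw [show PySem.Chars.replace (s.flatMap pvF1) ['<', '<', '<'] ['*']
        = PySem.Chars.replace.go ['<', '<', '<'] ['*'] (s.flatMap pvF1).length (s.flatMap pvF1) [] from by
      simp [PySem.Chars.replace]]
  have := pv_go_lll s hs 0 (s.flatMap pvF1).length [] (by simp [List.replicate])
  simp only [List.replicate, List.nil_append, List.reverse_nil] at this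
  rw [this]
  rw [show PySem.Chars.replace (s.flatMap pvF2) ['|', '|', '|'] ['/']
        = PySem.Chars.replace.go ['|', '|', '|'] ['/'] (s.flatMap pvF2).length (s.flatMap pvF2) [] from by
      simp [PySem.Chars.replace]]
  have h2 := pv_go_bbb s hs (s.flatMap pvF2).length [] le_rfl
  simpa using h2

theorem pv_lower_bridge (c : Char) : pvIsLowerA c = ('a' ≤ c && c ≤ 'z') := by
  by_cases h : 'a' ≤ c ∧ c ≤ 'z'
  · have h1 : 97 ≤ c.toNat := by
      have := h.1; rw [Char.le_def, UInt32.le_iff_toNat_le] at this; exact this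
    have h2 : c.toNat ≤ 122 := by
      have := h.2; rw [Char.le_def, UInt32.le_iff_toNat_le] at this; exact this
    rw [show ('a' ≤ c && c ≤ 'z') = true from by simp [h.1, h.2]]
    interval_cases hn : c.toNat <;>
      · have hcc := (Char.ofNat_toNat c).symm
        rw [hn] at hcc
        subst hcc
        decide
  · rw [show ('a' ≤ c && c ≤ 'z') = false from by
        rcases not_and_or.mp h with h' | h' <;> simp [h']]
    cases hl : pvIsLowerA c
    · rfl
    · exfalso
      simp only [pvIsLowerA, Bool.or_eq_true, beq_iff_eq] at hl
      rcases hl with ((((((((((((((((((((((((rfl | rfl) | rfl) | rfl) | rfl) | rfl) | rfl) | rfl) | rfl) | rfl) | rfl) | rfl) | rfl) | rfl) | rfl) | rfl) | rfl) | rfl) | rfl) | rfl) | rfl) | rfl) | rfl) | rfl) | rfl) | rfl <;>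
        exact h ⟨by decide, by decide⟩

theorem pv_map_slice (g : Char → Char) (l : List Char) :
    PySem.List.slice (l.map g) (some 1) (some (-1))
      = (PySem.List.slice l (some 1) (some (-1))).map g := by
  simp [PySem.List.slice, List.map_take, List.map_drop]

-- step equations for the two phase-2 folds (definitional; avoid the equation compiler)
theorem pvHH_nil (depo : List (List Char)) (net : List Char) :
    pvHelphelp [] depo net = pvFinishA depo := rfl

theorem pvHH_low (c : Char) (cs : List Char) (depo : List (List Char)) (net : List Char)
    (h : pvIsLowerA c = true) :
    pvHelphelp (c :: cs) depo net = pvHelphelp cs ([c] :: depo) net := by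
  show (if pvIsLowerA c then _ else _) = _
  rw [h]; simp

theorem pvHH_op0 (c : Char) (cs : List Char) (net : List Char) (h : pvIsLowerA c = false) :
    pvHelphelp (c :: cs) [] net = [] := by
  show (if pvIsLowerA c then _ else _) = _
  rw [h]; simp

theorem pvHH_op1 (c : Char) (cs : List Char) (x : List Char) (net : List Char)
    (h : pvIsLowerA c = false) :
    pvHelphelp (c :: cs) [x] net = [] := by
  show (if pvIsLowerA c then _ else _) = _
  rw [h]; simp

theorem pvHH_op2 (c : Char) (cs : List Char) (a b : List Char) (dr : List (List Char))
    (net : List Char) (h : pvIsLowerA c = false) :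
    pvHelphelp (c :: cs) (a :: b :: dr) net
      = pvHelphelp cs ((('(' :: b) ++ c :: a ++ [')']) :: dr) net := by
  show (if pvIsLowerA c then _ else _) = _
  rw [h]; simp

theorem pvB_nil (depo : List (List Char)) : pvBuild [] depo = pvFinishB depo := rfl

theorem pvB_low (c : Char) (cs : List Char) (depo : List (List Char))
    (h : ('a' ≤ c && c ≤ 'z') = true) :
    pvBuild (c :: cs) depo = pvBuild cs ([c] :: depo) := by
  show (if ('a' ≤ c && c ≤ 'z') then _ else _) = _
  rw [h]; simp

theorem pvB_op0 (c : Char) (cs : List Char) (h : ('a' ≤ c && c ≤ 'z') = false) :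
    pvBuild (c :: cs) [] = [] := by
  show (if ('a' ≤ c && c ≤ 'z') then _ else _) = _
  rw [h]; simp

theorem pvB_op1 (c : Char) (cs : List Char) (x : List Char) (h : ('a' ≤ c && c ≤ 'z') = false) :
    pvBuild (c :: cs) [x] = [] := by
  show (if ('a' ≤ c && c ≤ 'z') then _ else _) = _
  rw [h]; simp

theorem pvB_op2 (c : Char) (cs : List Char) (r l : List Char) (dr : List (List Char))
    (h : ('a' ≤ c && c ≤ 'z') = false) :
    pvBuild (c :: cs) (r :: l :: dr)
      = pvBuild cs ((('(' :: l) ++ pvSwap c :: r ++ [')']) :: dr) := by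
  show (if ('a' ≤ c && c ≤ 'z') then _ else _) = _
  rw [h]; simp

-- phase 2: A's helphelp equals B's build when B's stack is A's with * and / swapped
theorem pv_phase2 (P : List Char) : ∀ (depo : List (List Char)),
    pvClean P → (∀ d ∈ depo, pvClean d) →
    pvHelphelp P depo [] = pvBuild P (depo.map (List.map pvSwap)) := by
  induction P with
  | nil =>
    intro depo _ hd
    rw [pvHH_nil, pvB_nil]
    unfold pvFinishA pvFinishB
    rw [List.getLast?_map]
    cases hlast : depo.getLast? with
    | none => rfl
    | some d =>
      have hmem : d ∈ depo := List.mem_of_getLast? hlast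
      have hdc : pvClean d := hd d hmem
      simp only [Option.map_some]
      rw [pv_fevkalade_clean _ (by
        intro x hx
        simp only [PySem.Chars.slice_eq_listSlice] at hx
        exact hdc x (PySem.List.mem_of_mem_slice _ _ _ hx))]
      simp only [PySem.Chars.slice_eq_listSlice]
      exact (pv_map_slice pvSwap d).symm
  | cons c P ih =>
    intro depo hP hd
    have hc : pvCleanC c := hP c (List.mem_cons_self)
    have hP' : pvClean P := fun x hx => hP x (List.mem_cons_of_mem _ hx)
    by_cases hlow : ('a' ≤ c && c ≤ 'z') = true
    · have hlowA : pvIsLowerA c = true := by rw [pv_lower_bridge]; exact hlow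
      rw [pvHH_low _ _ _ _ hlowA, pvB_low _ _ _ hlow]
      have hns : c ≠ '*' ∧ c ≠ '/' := by
        simp only [Bool.and_eq_true, decide_eq_true_eq] at hlow
        constructor <;> rintro rfl <;> revert hlow <;> decide
      have hone : List.map pvSwap [c] = [c] := by
        simp [pvSwap, hns.1, hns.2]
      have hrec := ih ([c] :: depo) hP' (by
        intro d hdm
        rcases List.mem_cons.mp hdm with rfl | hdm'
        · intro x hx; simp at hx; subst hx; exact hc
        · exact hd d hdm')
      simp only [List.map_cons, hone] at hrec
      exact hrec
    · have hlowB : ('a' ≤ c && c ≤ 'z') = false := by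
        revert hlow; cases ('a' ≤ c && c ≤ 'z') <;> simp
      have hlowA : pvIsLowerA c = false := by rw [pv_lower_bridge]; exact hlowB
      cases depo with
      | nil =>
        simp only [List.map_nil]
        rw [pvHH_op0 _ _ _ hlowA, pvB_op0 _ _ hlowB]
      | cons a depo' =>
        cases depo' with
        | nil =>
          simp only [List.map_cons, List.map_nil]
          rw [pvHH_op1 _ _ _ _ hlowA, pvB_op1 _ _ _ hlowB]
        | cons b dr =>
          have ha : pvClean a := hd a (List.mem_cons_self)
          have hb : pvClean b := hd b (List.mem_cons_of_mem _ (List.mem_cons_self))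
          have hdr : ∀ d ∈ dr, pvClean d := fun d hdm =>
            hd d (List.mem_cons_of_mem _ (List.mem_cons_of_mem _ hdm))
          simp only [List.map_cons]
          rw [pvHH_op2 _ _ _ _ _ _ hlowA, pvB_op2 _ _ _ _ _ hlowB]
          have hent : (('(' :: List.map pvSwap b) ++ pvSwap c :: List.map pvSwap a ++ [')'])
              = List.map pvSwap (('(' :: b) ++ c :: a ++ [')']) := by
            simp [pvSwap]
          rw [hent]
          have hrec := ih ((('(' :: b) ++ c :: a ++ [')']) :: dr) hP' (by
            intro d hdm
            rcases List.mem_cons.mp hdm with rfl | hdm'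
            · intro x hx
              have hx' : x = '(' ∨ x ∈ b ∨ x = c ∨ x ∈ a ∨ x = ')' := by
                simpa [or_assoc] using hx
              rcases hx' with rfl | hxb | rfl | hxa | rfl
              · exact ⟨by decide, by decide⟩
              · exact hb x hxb
              · exact hc
              · exact ha x hxa
              · exact ⟨by decide, by decide⟩
            · exact hdr d hdm')
          simp only [List.map_cons] at hrec
          exact hrec

theorem pv_popParen_index : ∀ (st out : List Char),
    pvPopParen out st
      = (PySem.List.index? st '(').map (fun i => (out ++ st.take i, st.drop (i + 1))) := by
  intro st
  induction st with
  | nil =>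
    intro out
    simp [pvPopParen, PySem.List.index?]
  | cons t st ih =>
    intro out
    by_cases ht : t = '('
    · subst ht
      rw [PySem.List.index?_cons_self]
      simp [pvPopParen]
    · rw [PySem.List.index?_cons_of_ne _ ht]
      rw [show pvPopParen out (t :: st) = pvPopParen (out ++ [t]) st from by
          simp [pvPopParen, ht]]
      rw [ih (out ++ [t])]
      cases PySem.List.index? st '(' <;> simp

-- phase 1: A's restart-recursion equals B's single pass (for every input)
theorem pv_phase1 (ex out st : List Char) :
    pvZoitank ex out st =
      (match pvShunt ex out st with
       | some p => pvHelphelp p [] []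
       | none => []) := by
  induction ex, out, st using pvZoitank.induct with
  | case1 out => simp [pvZoitank, pvShunt, pvHelp]
  | case2 out st h => simp [pvZoitank, pvShunt, pvHelp, h]
  | case3 ex out st ih => cases st <;> simpa [pvZoitank, pvShunt] using ih
  | case4 ex out st _ ih => cases st <;> simpa [pvZoitank, pvShunt] using ih
  | case5 c ex out h1 h2 h3 ih =>
    rcases h3 with rfl | rfl <;> simpa [pvZoitank, pvShunt, pvPopStar] using ih
  | case6 c ex out h1 h2 h3 t st' ht ih =>
    rcases h3 with rfl | rfl <;> rcases ht with rfl | rfl | rfl <;>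
      simpa [pvZoitank, pvShunt, pvPopStar] using ih
  | case7 c ex out h1 h2 h3 t st' ht ih =>
    push_neg at ht
    rcases h3 with rfl | rfl <;>
      simpa [pvZoitank, pvShunt, pvPopStar, ht.1, ht.2.1, ht.2.2] using ih
  | case8 c ex out h1 h2 h3 h4 ih =>
    rcases h4 with rfl | rfl <;> simpa [pvZoitank, pvShunt, pvPopPlus] using ih
  | case9 c ex out h1 h2 h3 h4 st' ih =>
    rcases h4 with rfl | rfl <;> simpa [pvZoitank, pvShunt, pvPopPlus] using ih
  | case10 c ex out h1 h2 h3 h4 t st' ht ih =>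
    rcases h4 with rfl | rfl <;> simpa [pvZoitank, pvShunt, pvPopPlus, ht] using ih
  | case11 ex out st _ _ _ _ ih => cases st <;> simpa [pvZoitank, pvShunt] using ih
  | case12 ex out st i hidx _ _ _ _ _ ih =>
    have hidx' : List.idxOf? '(' st = some i := by
      simpa [PySem.List.index?] using hidx
    cases st with
    | nil => simp [PySem.List.index?] at hidx
    | cons t st' =>
      rw [show pvZoitank (')' :: ex) out (t :: st')
            = pvZoitank ex (out ++ List.take i (t :: st')) (List.drop (i + 1) (t :: st')) from by
          simp [pvZoitank, hidx, hidx']]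
      rw [show pvShunt (')' :: ex) out (t :: st')
            = pvShunt ex (out ++ List.take i (t :: st')) (List.drop (i + 1) (t :: st')) from by
          simp [pvShunt, pv_popParen_index, hidx, hidx']]
      exact ih
  | case13 ex out st hidx _ _ _ _ _ =>
    have hidx' : List.idxOf? '(' st = none := by
      simpa [PySem.List.index?] using hidx
    cases st with
    | nil =>
      rw [show pvZoitank (')' :: ex) out [] = [] from by simp [pvZoitank, PySem.List.index?]]
      rw [show pvShunt (')' :: ex) out [] = none from by simp [pvShunt, pvPopParen]]
    | cons t st' =>
      rw [show pvZoitank (')' :: ex) out (t :: st') = [] from by simp [pvZoitank, hidx, hidx']]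
      rw [show pvShunt (')' :: ex) out (t :: st') = none from by
          simp [pvShunt, pv_popParen_index, hidx, hidx']]
  | case14 c ex out st h1 h2 h3 h4 h5 h6 ih =>
    push_neg at h3 h4
    cases st <;>
      simpa [pvZoitank, pvShunt, h1, h2, h3.1, h3.2, h4.1, h4.2, h5, h6] using ih

theorem pv_popStar_append : ∀ (st out : List Char),
    (pvPopStar out st).1 ++ (pvPopStar out st).2 = out ++ st := by
  intro st
  induction st with
  | nil => intro out; simp [pvPopStar]
  | cons t st ih =>
    intro out
    by_cases h : (t != '+' && t != '-' && t != '(') = true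
    · rw [show pvPopStar out (t :: st) = pvPopStar (out ++ [t]) st from by
          simp only [pvPopStar, h, if_true]]
      rw [ih (out ++ [t])]
      simp
    · simp [pvPopStar, h]

theorem pv_popPlus_append : ∀ (st out : List Char),
    (pvPopPlus out st).1 ++ (pvPopPlus out st).2 = out ++ st := by
  intro st
  induction st with
  | nil => intro out; simp [pvPopPlus]
  | cons t st ih =>
    intro out
    by_cases h : (t != '(') = true
    · rw [show pvPopPlus out (t :: st) = pvPopPlus (out ++ [t]) st from by
          simp only [pvPopPlus, h, if_true]]
      rw [ih (out ++ [t])]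
      simp
    · simp [pvPopPlus, h]

-- the emitted postfix only contains characters of the inputs
theorem pv_shunt_clean : ∀ (ex out st : List Char), pvClean ex → pvClean out → pvClean st →
    ∀ {p : List Char}, pvShunt ex out st = some p → pvClean p := by
  intro ex
  induction ex with
  | nil =>
    intro out st _ ho hs p h
    simp only [pvShunt, Option.some_inj] at h
    subst h
    intro x hx
    rcases List.mem_append.mp hx with hx' | hx'
    · exact ho x hx'
    · exact hs x hx'
  | cons c ex ih =>
    intro out st hex ho hs p h
    have hc : pvCleanC c := hex c (List.mem_cons_self)
    have hex' : pvClean ex := fun x hx => hex x (List.mem_cons_of_mem _ hx)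
    have hos : pvClean (out ++ st) := by
      intro x hx
      rcases List.mem_append.mp hx with hx' | hx'
      · exact ho x hx'
      · exact hs x hx'
    simp only [pvShunt] at h
    split_ifs at h with g1 g2 g3 g4 g5
    · exact ih out st hex' ho hs h
    · refine ih out (c :: st) hex' ho ?_ h
      intro x hx
      rcases List.mem_cons.mp hx with rfl | hx'
      · exact hc
      · exact hs x hx'
    · refine ih (pvPopStar out st).1 (c :: (pvPopStar out st).2) hex' ?_ ?_ h
      · intro x hx
        exact hos x (by rw [← pv_popStar_append st out]; exact List.mem_append.mpr (Or.inl hx))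
      · intro x hx
        rcases List.mem_cons.mp hx with rfl | hx'
        · exact hc
        · exact hos x (by rw [← pv_popStar_append st out]; exact List.mem_append.mpr (Or.inr hx'))
    · refine ih (pvPopPlus out st).1 (c :: (pvPopPlus out st).2) hex' ?_ ?_ h
      · intro x hx
        exact hos x (by rw [← pv_popPlus_append st out]; exact List.mem_append.mpr (Or.inl hx))
      · intro x hx
        rcases List.mem_cons.mp hx with rfl | hx'
        · exact hc
        · exact hos x (by rw [← pv_popPlus_append st out]; exact List.mem_append.mpr (Or.inr hx'))
    · rw [pv_popParen_index] at h
      cases hidx : PySem.List.index? st '(' with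
      | none => rw [hidx] at h; simp at h
      | some i =>
        rw [hidx] at h
        simp only [Option.map_some] at h
        refine ih _ _ hex' ?_ ?_ h
        · intro x hx
          rcases List.mem_append.mp hx with hx' | hx'
          · exact ho x hx'
          · exact hs x (List.mem_of_mem_take hx')
        · intro x hx
          exact hs x (List.mem_of_mem_drop hx)
    · refine ih (out ++ [c]) st hex' ?_ hs h
      intro x hx
      rcases List.mem_append.mp hx with hx' | hx'
      · exact ho x hx'
      · simp at hx'; subst hx'; exact hc

theorem pv_cleanStr_clean (s : String) (h : pvCleanStr s = true) : pvClean s.toList := by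
  intro c hc
  have hcb := List.all_eq_true.1 h c hc
  simp only [Bool.and_eq_true, bne_iff_ne, ne_eq] at hcb
  exact ⟨hcb.1, hcb.2⟩

-- ===== VERDICT (by name: the statement is the Claim_ definition above) =====
theorem zoitank_spec : Claim_equal_zoitank := by
  intro ex final stack _ hpre
  unfold Spec_zoitank zoitank zoitank_alt
  unfold Pre_zoitank at hpre
  simp only [Bool.and_eq_true] at hpre
  obtain ⟨⟨⟨hex, hfin⟩, hst⟩, -⟩ := hpre
  rw [pv_phase1]
  cases h : pvShunt ex.toList final.toList stack.toList.reverse with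
  | none => rfl
  | some p =>
    have hp : pvClean p :=
      pv_shunt_clean _ _ _ (pv_cleanStr_clean _ hex) (pv_cleanStr_clean _ hfin)
        (fun c hc => pv_cleanStr_clean _ hst c (List.mem_reverse.mp hc)) h
    simp only []
    have h2 := pv_phase2 p [] hp (by intro d hd; cases hd)
    simp only [List.map_nil] at h2
    rw [h2]
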